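-- pv_equiv track=rewrite | github.com/pnnl/PermitAI | MAPLEv2/utils/prompt_utils.py | _split_template_by_code_blocks
-- ===== SOURCE A (Python) =====
-- from typing import Dict, List, Any, Union
--
-- def _split_template_by_code_blocks(template: str) -> List[tuple]:
--     """
--     Split a template into code blocks and non-code blocks.
--
--     Args:
--         template (str): The template string.
--
--     Returns:
--         List[tuple]: List of (text, is_code_block) tuples.
--     """
--     parts = []
--     is_code_block = False
--     current_part = ""
--
--     for line in template.split('\n'):
--         if line.strip().startswith('```'):
--             # Process the current part if it's not empty
--             if current_part:
--                 parts.append((current_part, is_code_block))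
--                 current_part = ""
--
--             # Add the code block marker
--             current_part += line + '\n'
--
--             # Toggle code block state
--             is_code_block = not is_code_block
--         else:
--             current_part += line + '\n'
--
--     # Add the last part if not empty
--     if current_part:
--         parts.append((current_part, is_code_block))
--
--     return parts
-- ===== SOURCE B (Python) =====
-- def _split_template_by_code_blocks(template):
--     """Two-pass: label every line with a running fence count, then emit one
--     segment per maximal run of equally-labelled lines (odd label = code)."""
--     lines = template.split('\n')
--     labels = []
--     count = 0
--     for line in lines:
--         if line.strip().startswith('```'):
--             count += 1
--         labels.append(count)
--     parts = []
--     pairs = list(zip(labels, lines))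
--     while pairs:
--         g = pairs[0][0]
--         k = 0
--         while k < len(pairs) and pairs[k][0] == g:
--             k += 1
--         text = ''.join(line + '\n' for (_, line) in pairs[:k])
--         parts.append((text, g % 2 == 1))
--         pairs = pairs[k:]
--     return parts
-- ===== Notes on version B (the rewrite author's own statement) =====
-- stated objective: alternative
-- what changed: Replaces A's single-pass state machine (flush-on-fence with a toggled flag and a mutable current buffer) by a two-pass label-then-group algorithm: first label each line with a running fence count, then emit one segment per maximal run of equal labels, the label's parity giving is_code.
import Mathlib
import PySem

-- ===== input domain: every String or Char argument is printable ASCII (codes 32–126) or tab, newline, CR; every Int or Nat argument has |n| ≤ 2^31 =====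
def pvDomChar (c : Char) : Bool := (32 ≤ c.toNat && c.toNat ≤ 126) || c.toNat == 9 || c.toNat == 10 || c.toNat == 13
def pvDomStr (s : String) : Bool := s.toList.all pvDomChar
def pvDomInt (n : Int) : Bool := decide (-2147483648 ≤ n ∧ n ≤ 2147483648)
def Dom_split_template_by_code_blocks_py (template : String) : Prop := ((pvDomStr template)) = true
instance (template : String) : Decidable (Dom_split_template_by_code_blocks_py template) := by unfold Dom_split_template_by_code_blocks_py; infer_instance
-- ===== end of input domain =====

-- B replaces A's single-pass flush-on-fence state machine by a two-pass
-- label-lines-then-group-runs algorithm (an alternative decomposition, same cost).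


-- ===== PORT A =====
-- line.strip().startswith('```')
def pvFence (line : String) : Bool := PySem.Str.startswith (PySem.Str.strip line) "```"

-- template.split('\n'); the separator is the literal "\n" ≠ "", so split? is
-- always `some` and `.getD []` merely totalizes the type
def pvLines (template : String) : List String := (PySem.Str.split? template "\n").getD []

-- the body of A's for-loop over the state (parts, is_code_block, current_part)
def pvAStep (st : List (String × Bool) × Bool × String) (line : String) :
    List (String × Bool) × Bool × String :=
  match st with
  | (parts, isCode, cur) =>
    if pvFence line then
      ((if cur ≠ "" then parts ++ [(cur, isCode)] else parts), !isCode, line ++ "\n")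
    else
      (parts, isCode, cur ++ line ++ "\n")

-- A's trailing 'if current_part: parts.append(...)' flush
def pvFinishSt (st : List (String × Bool) × Bool × String) : List (String × Bool) :=
  if st.2.2 ≠ "" then st.1 ++ [(st.2.2, st.2.1)] else st.1

def split_template_by_code_blocks_py (template : String) : List (String × Bool) :=
  pvFinishSt ((pvLines template).foldl pvAStep ([], false, ""))

-- ===== PORT B =====
-- the outer while-loop of Source B: peel off the maximal run of pairs sharing the
-- head's label (the inner `while k < len(pairs) and pairs[k][0] == g` scan is
-- takeWhile/dropWhile of the tail), emit its joined text and the label's parity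
def pvGroups : List (Nat × String) → List (String × Bool)
  | [] => []
  | (g, l) :: rest =>
    let run := rest.takeWhile (fun p => p.1 == g)
    let rest' := rest.dropWhile (fun p => p.1 == g)
    (PySem.Str.join "" (((g, l) :: run).map (fun p => p.2 ++ "\n")), g % 2 == 1) :: pvGroups rest'
termination_by pairs => pairs.length
decreasing_by
  exact Nat.lt_succ_of_le (List.length_dropWhile_le _ _)

def split_template_by_code_blocks_py_alt (template : String) : List (String × Bool) :=
  let lines := pvLines template
  let labels := (lines.foldl
    (fun (st : List Nat × Nat) line =>
      let c := if pvFence line then st.2 + 1 else st.2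
      (st.1 ++ [c], c)) ([], 0)).1
  pvGroups (labels.zip lines)

-- ===== PRECONDITION & SPEC =====
def Spec_split_template_by_code_blocks_py (template : String) (out : List (String × Bool)) : Prop := out = split_template_by_code_blocks_py_alt template
instance (template : String) (out : List (String × Bool)) : Decidable (Spec_split_template_by_code_blocks_py template out) := by unfold Spec_split_template_by_code_blocks_py; infer_instance

-- ===== CLAIM (what is proved, stated in full; the proofs are below) =====
def Claim_equal_split_template_by_code_blocks_py : Prop := ∀ (template : String), Dom_split_template_by_code_blocks_py template → Spec_split_template_by_code_blocks_py template (split_template_by_code_blocks_py template)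

-- ===== LEMMAS AND PROOFS =====

-- B's labelled lines, written as one recursion (proof artefact)
def pvZipLabels (c : Nat) : List String → List (Nat × String)
  | [] => []
  | l :: ls =>
    let c' := if pvFence l then c + 1 else c
    (c', l) :: pvZipLabels c' ls

def pvLabels (c : Nat) (ls : List String) : List Nat := (pvZipLabels c ls).map Prod.fst

-- A's remaining loop plus final flush, from an empty parts accumulator
def pvAFinish (lines : List String) (code : Bool) (cur : String) : List (String × Bool) :=
  pvFinishSt (lines.foldl pvAStep ([], code, cur))

def pvHeadFence : List String → Bool
  | [] => false
  | l :: _ => pvFence l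

-- merge a pending buffer into the first group (or make it the only group)
def pvMerge (c : Nat) (cur : String) : List (String × Bool) → List (String × Bool)
  | [] => [(cur, c % 2 == 1)]
  | (t, b) :: r => (cur ++ t, b) :: r

lemma pvJoinEmptyCons (x : String) (xs : List String) :
    PySem.Str.join "" (x :: xs) = x ++ PySem.Str.join "" xs := by
  cases xs with
  | nil => simp [PySem.Str.join, PySem.Chars.join_singleton]
  | cons y r => simp [PySem.Str.join, PySem.Chars.join_cons_cons]

lemma pvNeEmpty (s : String) : s ++ "\n" ≠ "" := by
  intro h
  have := congrArg String.toList h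
  simp at this

lemma pvParitySucc (c : Nat) : ((c + 1) % 2 == 1) = !(c % 2 == 1) := by
  rcases Nat.mod_two_eq_zero_or_one c with h | h <;> simp [Nat.add_mod, h]

-- one step of A's loop only appends to the parts accumulator
lemma pvGroupsNil : pvGroups [] = [] := by rw [pvGroups]

lemma pvStepAcc (parts : List (String × Bool)) (code : Bool) (cur : String) (l : String) :
    pvAStep (parts, code, cur) l =
      (parts ++ (pvAStep ([], code, cur) l).1, (pvAStep ([], code, cur) l).2) := by
  by_cases hf : pvFence l <;> by_cases hc : cur = "" <;> simp [pvAStep, hf, hc]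

-- hence the whole loop does
lemma pvFoldlAcc (lines : List String) (parts : List (String × Bool)) (code : Bool) (cur : String) :
    lines.foldl pvAStep (parts, code, cur) =
      (parts ++ (lines.foldl pvAStep ([], code, cur)).1, (lines.foldl pvAStep ([], code, cur)).2) := by
  induction lines generalizing parts code cur with
  | nil => simp
  | cons l ls ih =>
    rcases hE : pvAStep ([], code, cur) l with ⟨p1, c1, s1⟩
    rw [List.foldl_cons, List.foldl_cons, pvStepAcc parts code cur l, hE]
    rw [ih, ih p1]
    simp

lemma pvAFinishAcc (lines : List String) (parts : List (String × Bool)) (code : Bool) (cur : String) :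
    pvFinishSt (lines.foldl pvAStep (parts, code, cur)) = parts ++ pvAFinish lines code cur := by
  rw [pvFoldlAcc]
  unfold pvAFinish pvFinishSt
  by_cases h : (lines.foldl pvAStep ([], code, cur)).2.2 = "" <;> simp [h]

-- one-group unfolding of pvGroups on labelled lines
lemma pvGroupsCons (rest : List String) (c : Nat) (l : String) :
    pvGroups ((c, l) :: pvZipLabels c rest) =
      if pvHeadFence rest then (l ++ "\n", c % 2 == 1) :: pvGroups (pvZipLabels c rest)
      else pvMerge c (l ++ "\n") (pvGroups (pvZipLabels c rest)) := by
  cases rest with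
  | nil =>
    rw [show pvZipLabels c [] = [] from rfl, pvGroupsNil, pvGroups]
    simp [pvGroupsNil, pvHeadFence, pvMerge, PySem.Str.join, PySem.Chars.join_singleton]
  | cons r rest2 =>
    cases hf : pvFence r with
    | true =>
      have hz : pvZipLabels c (r :: rest2) = (c + 1, r) :: pvZipLabels (c + 1) rest2 := by
        simp [pvZipLabels, hf]
      have hne : ((c + 1 : Nat) == c) = false := by simp
      rw [hz, pvGroups]
      simp [pvHeadFence, hf, List.takeWhile, List.dropWhile, hne,
        PySem.Str.join, PySem.Chars.join_singleton]
    | false =>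
      have hz : pvZipLabels c (r :: rest2) = (c, r) :: pvZipLabels c rest2 := by
        simp [pvZipLabels, hf]
      rw [hz, pvGroups, pvGroups]
      simp [pvHeadFence, hf, List.takeWhile, List.dropWhile, pvMerge, pvJoinEmptyCons,
        String.append_assoc]

lemma pvMergeMerge (c : Nat) (cur x : String) (gs : List (String × Bool)) :
    pvMerge c cur (pvMerge c x gs) = pvMerge c (cur ++ x) gs := by
  cases gs with
  | nil => simp [pvMerge]
  | cons g r => cases g; simp [pvMerge, String.append_assoc]

-- main invariant: A's remaining loop with a nonempty buffer equals B's grouping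
lemma pvMain (lines : List String) (c : Nat) (cur : String) (hcur : cur ≠ "") :
    pvAFinish lines (c % 2 == 1) cur =
      if pvHeadFence lines then (cur, c % 2 == 1) :: pvGroups (pvZipLabels c lines)
      else pvMerge c cur (pvGroups (pvZipLabels c lines)) := by
  induction lines generalizing c cur with
  | nil =>
    rw [show pvZipLabels c [] = [] from rfl, pvGroups]
    simp [pvAFinish, pvFinishSt, pvHeadFence, pvMerge, hcur]
  | cons l rest ih =>
    cases hf : pvFence l with
    | true =>
      have h1 : pvAFinish (l :: rest) (c % 2 == 1) cur
          = [(cur, (c % 2 == 1))] ++ pvAFinish rest ((c + 1) % 2 == 1) (l ++ "\n") := by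
        unfold pvAFinish
        simp only [List.foldl_cons, pvAStep, hf, hcur, ne_eq, not_false_eq_true,
          if_pos, pvParitySucc]
        exact pvAFinishAcc rest [(cur, (c % 2 == 1))] (!(c % 2 == 1)) (l ++ "\n")
      have h2 : pvZipLabels c (l :: rest) = (c + 1, l) :: pvZipLabels (c + 1) rest := by
        simp [pvZipLabels, hf]
      rw [h1, ih (c + 1) (l ++ "\n") (pvNeEmpty l),
        show pvHeadFence (l :: rest) = true from hf, if_pos rfl,
        h2, pvGroupsCons]
      simp
    | false =>
      have h1 : pvAFinish (l :: rest) (c % 2 == 1) cur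
          = pvAFinish rest (c % 2 == 1) (cur ++ l ++ "\n") := by
        unfold pvAFinish
        simp [pvAStep, hf]
      have h2 : pvZipLabels c (l :: rest) = (c, l) :: pvZipLabels c rest := by
        simp [pvZipLabels, hf]
      rw [h1, ih c (cur ++ l ++ "\n") (pvNeEmpty (cur ++ l)), h2, pvGroupsCons,
        show pvHeadFence (l :: rest) = false from hf]
      simp only [Bool.false_eq_true, if_false]
      by_cases hr : pvHeadFence rest = true
      · simp [hr, pvMerge, String.append_assoc]
      · simp [hr, pvMergeMerge, String.append_assoc]

-- B's labels foldl produces pvLabels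
lemma pvLabelsFoldl (lines : List String) (acc : List Nat) (c : Nat) :
    (lines.foldl
      (fun (st : List Nat × Nat) line =>
        let c := if pvFence line then st.2 + 1 else st.2
        (st.1 ++ [c], c)) (acc, c)).1 = acc ++ pvLabels c lines := by
  induction lines generalizing acc c with
  | nil => simp [pvLabels, pvZipLabels]
  | cons l ls ih =>
    cases hf : pvFence l <;>
      · simp only [List.foldl_cons, hf, pvLabels, pvZipLabels, ite_true, ite_false,
          Bool.false_eq_true, List.map_cons]
        rw [ih]
        simp [pvLabels]
lemma pvZipEq (lines : List String) (c : Nat) :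
    (pvLabels c lines).zip lines = pvZipLabels c lines := by
  induction lines generalizing c with
  | nil => simp [pvLabels, pvZipLabels]
  | cons l ls ih =>
    simp only [pvLabels, pvZipLabels, List.map_cons, List.zip_cons_cons] at ih ⊢
    exact congrArg _ (ih _)

lemma pvAltEq (template : String) :
    split_template_by_code_blocks_py_alt template =
      pvGroups (pvZipLabels 0 (pvLines template)) := by
  simp [split_template_by_code_blocks_py_alt, pvLabelsFoldl, pvZipEq]

-- ===== VERDICT (by name: the statement is the Claim_ definition above) =====
theorem split_template_by_code_blocks_py_spec : Claim_equal_split_template_by_code_blocks_py := by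
  intro template _
  unfold Spec_split_template_by_code_blocks_py
  rw [pvAltEq]
  unfold split_template_by_code_blocks_py
  cases hls : pvLines template with
  | nil =>
    rw [show pvZipLabels 0 [] = [] from rfl, pvGroupsNil]
    simp [pvFinishSt]
  | cons l rest =>
    cases hf : pvFence l with
    | true =>
      have h1 : (l :: rest).foldl pvAStep ([], false, "") = rest.foldl pvAStep ([], true, l ++ "\n") := by
        simp [pvAStep, hf]
      have h2 : pvZipLabels 0 (l :: rest) = (1, l) :: pvZipLabels 1 rest := by
        simp [pvZipLabels, hf]
      rw [h1, show pvFinishSt (rest.foldl pvAStep ([], true, l ++ "\n"))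
            = pvAFinish rest ((1 % 2 == 1)) (l ++ "\n") from rfl,
        pvMain rest 1 (l ++ "\n") (pvNeEmpty l), h2, pvGroupsCons]
    | false =>
      have h1 : (l :: rest).foldl pvAStep ([], false, "") = rest.foldl pvAStep ([], false, l ++ "\n") := by
        simp [pvAStep, hf]
      have h2 : pvZipLabels 0 (l :: rest) = (0, l) :: pvZipLabels 0 rest := by
        simp [pvZipLabels, hf]
      rw [h1, show pvFinishSt (rest.foldl pvAStep ([], false, l ++ "\n"))
            = pvAFinish rest ((0 % 2 == 1)) (l ++ "\n") from rfl,
        pvMain rest 0 (l ++ "\n") (pvNeEmpty l), h2, pvGroupsCons]
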